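-- pv_equiv track=rewrite | github.com/catalinc/aoc2020 | src/day8.py | break_loop
-- ===== SOURCE A (Python) =====
-- from typing import Tuple, List
--
-- def run_program(instructions: List[str]) -> Tuple[bool, int]:
--     pc, acc, hist = 0, 0, set()
--     while pc < len(instructions):
--         op, arg = decode(instructions[pc])
--         if op == "nop":
--             pc += 1
--         elif op == "acc":
--             acc += arg
--             pc += 1
--         elif op == "jmp":
--             pc += arg
--         if pc in hist:
--             return False, acc
--         hist.add(pc)
--     return True, acc
--
-- def decode(instruction: str) -> Tuple[str, int]:
--     op, arg = instruction.split(' ')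
--     return op, int(arg)
--
-- def break_loop(instructions: List[str]) -> int:
--     for i, instr in enumerate(instructions):
--         if instr.startswith('jmp'):
--             new_instructions = instructions[:]
--             new_instructions[i] = 'nop +0'
--             done, acc = run_program(new_instructions)
--             if done:
--                 return acc
-- ===== SOURCE B (Python) =====
-- def break_loop(instructions):
--     candidates = [i for i, s in enumerate(instructions) if s.startswith('jmp')]
--     if not candidates:
--         return None
--     prog = []
--     for line in instructions:
--         op, arg = line.split(' ')
--         prog.append((op, int(arg)))
--     n = len(prog)
--     # One run of the ORIGINAL program, recording the accumulator at the first
--     # execution of every pc, and whether (with what accumulator) it terminates.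
--     first_acc = {}
--     pc, acc = 0, 0
--     while pc < n and pc not in first_acc:
--         first_acc[pc] = acc
--         op, arg = prog[pc]
--         if op == 'acc':
--             acc += arg
--             pc += 1
--         elif op == 'jmp':
--             pc += arg
--         elif op == 'nop':
--             pc += 1
--     orig_done, orig_acc = pc >= n, acc
--     # A flip at i changes the run only if the original run executes i; otherwise
--     # the flipped program behaves exactly like the original one.
--     for i in candidates:
--         if i in first_acc:
--             # resume at i+1 with the accumulator the shared prefix produced;
--             # an exiting run repeats no pc, so it exits within n steps
--             pc, acc = i + 1, first_acc[i]
--             for _ in range(n + 1):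
--                 if pc >= n:
--                     return acc
--                 op, arg = prog[pc]
--                 if pc == i or op == 'nop':
--                     pc += 1
--                 elif op == 'acc':
--                     acc += arg
--                     pc += 1
--                 elif op == 'jmp':
--                     pc += arg
--         elif orig_done:
--             return orig_acc
--     return None
-- ===== Notes on version B (the rewrite author's own statement) =====
-- stated objective: alternative
-- what changed: A copies the list and fully re-simulates every flipped program from pc 0 with a history set; B parses once, simulates the ORIGINAL program once recording the accumulator at the first execution of each pc, then for each jmp candidate either reuses that run's verdict outright (flip never executed by it) or resumes the trial at i+1 with the recorded accumulator, detecting loops by a pigeonhole step bound instead of a visited set, so the shared prefix of a trial is never re-executed.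
-- outside the precondition, e.g. on break_loop(['jmp +2', 'jmp +2', 'junk j']): A returns 0, B raises ValueError; on break_loop(['jmp']): A returns 0, B raises ValueError; on break_loop(['jmp -1']): A returns 0, B raises IndexError
import Mathlib
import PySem

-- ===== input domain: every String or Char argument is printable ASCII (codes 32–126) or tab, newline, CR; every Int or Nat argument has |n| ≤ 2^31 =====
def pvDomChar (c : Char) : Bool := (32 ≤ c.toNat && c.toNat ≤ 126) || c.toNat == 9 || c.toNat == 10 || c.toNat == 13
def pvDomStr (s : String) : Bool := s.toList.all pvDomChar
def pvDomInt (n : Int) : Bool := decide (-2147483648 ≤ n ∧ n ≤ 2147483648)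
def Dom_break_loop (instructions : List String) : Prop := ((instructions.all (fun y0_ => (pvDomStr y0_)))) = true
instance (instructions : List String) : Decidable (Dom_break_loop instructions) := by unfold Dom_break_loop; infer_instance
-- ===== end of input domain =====

-- B simulates the original program ONCE, recording the accumulator at the first execution of
-- every pc; a flip at i matters only if that run executes i, and then the trial resumes at
-- i+1 with the recorded accumulator under a pigeonhole step bound, instead of re-simulating
-- each flipped copy from scratch with a history set (objective: alternative; exactness of the
-- shared prefix and of the n-step bound is what the proof establishes).

-- ===== PORT A =====
-- decode(instruction): split on ' ', int(arg); none = ValueError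
def decodeA (instruction : String) : Option (String × Int) :=
  match PySem.Str.split? instruction " " with
  | some [op, arg] => (PySem.Int.ofStr? arg).map (fun a => (op, a))
  | _ => none

-- run_program's while loop; fuel bounds the iterations (inside Pre_ the loop makes at most
-- n+1 iterations, see the proofs; fuel 2n+2 is ample). none = exception or fuel exhausted.
def runA (instructions : List String) : Nat → Int → Int → PySem.Set Int → Option (Bool × Int)
  | 0, _, _, _ => none
  | fuel+1, pc, acc, hist =>
    if pc < (instructions.length : Int) then
      match PySem.List.pyGet? instructions pc with
      | none => none                       -- IndexError (negative wrap out of range)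
      | some instr =>
        match decodeA instr with
        | none => none                     -- ValueError in decode
        | some (op, arg) =>
          let s :=
            if op == "nop" then (pc + 1, acc)
            else if op == "acc" then (pc + 1, acc + arg)
            else if op == "jmp" then (pc + arg, acc)
            else (pc, acc)
          if PySem.Set.contains hist s.1 then some (false, s.2)
          else runA instructions fuel s.1 s.2 (PySem.Set.add hist s.1)
    else some (true, acc)

-- for i, instr in enumerate(instructions): if instr.startswith('jmp'): splice and run
def outerA (instructions : List String) : List (Int × String) → Option Int
  | [] => none
  | (i, instr) :: rest =>
    if PySem.Str.startswith instr "jmp" then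
      let newInstructions := instructions.set i.toNat "nop +0"
      match runA newInstructions (2 * newInstructions.length + 2) 0 0 PySem.Set.empty with
      | some (true, acc) => some acc
      | some (false, _) => outerA instructions rest
      | none => none
    else outerA instructions rest

def break_loop (instructions : List String) : Option Int :=
  outerA instructions (PySem.List.enumerate instructions)

-- ===== PORT B =====
-- prog = []; for line in instructions: op, arg = line.split(' '); prog.append((op, int(arg)))
def parseB : List String → Option (List (String × Int))
  | [] => some []
  | line :: rest =>
    match PySem.Str.split? line " " with
    | some [op, arg] =>
      match PySem.Int.ofStr? arg with
      | some a => (parseB rest).map (fun ps => (op, a) :: ps)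
      | none => none
    | _ => none

-- the one precomputation run of the ORIGINAL program:
-- while pc < n and pc not in first_acc: first_acc[pc] = acc; step
-- fuel is a totality device only (the dict gains a key every iteration; 2n+2 is ample
-- inside Pre_); none = exception or fuel exhausted
def preRunB (prog : List (String × Int)) :
    Nat → Int → Int → PySem.Dict Int Int → Option (PySem.Dict Int Int × Int × Int)
  | 0, _, _, _ => none
  | fuel+1, pc, acc, d =>
    if pc < (prog.length : Int) && !(d.contains pc) then
      let d' := d.insert pc acc
      match PySem.List.pyGet? prog pc with
      | none => none
      | some (op, arg) =>
        let s :=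
          if op == "acc" then (pc + 1, acc + arg)
          else if op == "jmp" then (pc + arg, acc)
          else if op == "nop" then (pc + 1, acc)
          else (pc, acc)
        preRunB prog fuel s.1 s.2 d'
    else some (d, pc, acc)

-- the candidate trial: for _ in range(n+1): if pc >= n: return acc; step (pc==i acts as nop);
-- the fuel IS the range counter (exactly n+1 iterations in Source B).
-- some (some acc) = return acc, some none = bound exhausted (trial fails), none = exception
def walkB (prog : List (String × Int)) (i : Int) : Nat → Int → Int → Option (Option Int)
  | 0, _, _ => some none
  | fuel+1, pc, acc =>
    if (prog.length : Int) ≤ pc then some (some acc)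
    else
      match PySem.List.pyGet? prog pc with
      | none => none
      | some (op, arg) =>
        let s :=
          if pc == i || op == "nop" then (pc + 1, acc)
          else if op == "acc" then (pc + 1, acc + arg)
          else if op == "jmp" then (pc + arg, acc)
          else (pc, acc)
        walkB prog i fuel s.1 s.2

-- for i in candidates: if i in first_acc: trial from i+1, else use the original run's verdict
def tryCandB (prog : List (String × Int)) (d : PySem.Dict Int Int)
    (origDone : Bool) (origAcc : Int) : List Int → Option (Option Int)
  | [] => some none
  | i :: rest =>
    match d.get? i with
    | some a0 =>
      match walkB prog i (prog.length + 1) (i + 1) a0 with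
      | none => none
      | some (some acc) => some (some acc)
      | some none => tryCandB prog d origDone origAcc rest
    | none =>
      if origDone then some (some origAcc) else tryCandB prog d origDone origAcc rest

def break_loop_alt (instructions : List String) : Option Int :=
  let candidates := ((PySem.List.enumerate instructions).filter
    (fun p => PySem.Str.startswith p.2 "jmp")).map (fun p => p.1)
  if candidates.isEmpty then none
  else
    match parseB instructions with
    | none => none                         -- ValueError while parsing up front
    | some prog =>
      match preRunB prog (2 * prog.length + 2) 0 0 PySem.Dict.empty with
      | none => none
      | some (d, pcF, accF) =>
        match tryCandB prog d (decide ((prog.length : Int) ≤ pcF)) accF candidates with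
        | some r => r
        | none => none

-- ===== PRECONDITION & SPEC =====
-- pvParse is Pre_'s own copy of the instruction shape check (Pre_ may not refer to the ports).
def pvParse (s : String) : Option (String × Int) :=
  match PySem.Str.split? s " " with
  | some [op, arg] => (PySem.Int.ofStr? arg).map (fun a => (op, a))
  | _ => none

def pvJmpOK (p : Int × String) : Bool :=
  match pvParse p.2 with
  | some (op, a) => !(op == "jmp") || decide (0 ≤ p.1 + a)
  | none => true

-- Pre_ excludes inputs on which A still returns in two corners: (a) programs that contain a
-- 'jmp'-prefixed line together with a line that does not parse as 'op int' — whether A's trial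
-- runs reach the bad line is an accident of the run, and B, which parses everything up front,
-- raises ValueError there; (b) well-formed programs with a jmp instruction whose target index
-- i+arg is negative, where Python's negative-list-index wraparound makes the interpreter's
-- behaviour accidental. Programs with no 'jmp'-prefixed line are always admitted (A scans and
-- returns None without decoding anything).
def Pre_break_loop (instructions : List String) : Prop :=
  (instructions.all (fun s => !(PySem.Str.startswith s "jmp")) = true)
  ∨ ((instructions.all (fun s => (pvParse s).isSome) = true)
     ∧ (PySem.List.enumerate instructions).all pvJmpOK = true)

instance (instructions : List String) : Decidable (Pre_break_loop instructions) := by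
  unfold Pre_break_loop; infer_instance

def pvWitness_break_loop : List String := ["acc +1", "jmp -1"]

def Spec_break_loop (instructions : List String) (out : Option Int) : Prop := out = break_loop_alt instructions
instance (instructions : List String) (out : Option Int) : Decidable (Spec_break_loop instructions out) := by unfold Spec_break_loop; infer_instance

-- ===== CLAIM (what is proved, stated in full; the proofs are below) =====
def Claim_equal_break_loop : Prop := ∀ (instructions : List String), Dom_break_loop instructions → Pre_break_loop instructions → Spec_break_loop instructions (break_loop instructions)

-- ===== LEMMAS AND PROOFS =====

theorem decodeA_eq_pvParse (s : String) : decodeA s = pvParse s := rfl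

theorem no_jmp_outerA (instructions : List String) (l : List (Int × String))
    (h : ∀ p ∈ l, PySem.Str.startswith p.2 "jmp" = false) :
    outerA instructions l = none := by
  induction l with
  | nil => rfl
  | cons p rest ih =>
    obtain ⟨i, instr⟩ := p
    have h0 := h (i, instr) (by simp)
    simp only [outerA, h0, Bool.false_eq_true, if_false]
    exact ih (fun q hq => h q (by simp [hq]))

-- parseB succeeds and yields the per-line parses when every line parses
theorem parseB_eq_map (instructions : List String)
    (h : instructions.all (fun s => (pvParse s).isSome) = true) :
    parseB instructions = some (instructions.map (fun s => (pvParse s).getD ("", 0))) := by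
  induction instructions with
  | nil => rfl
  | cons line rest ih =>
    simp only [List.all_cons, Bool.and_eq_true] at h
    have h1 := h.1
    have ih' := ih h.2
    obtain ⟨⟨op, a⟩, hpa⟩ := Option.isSome_iff_exists.mp h1
    have : pvParse line = some (op, a) := hpa
    unfold pvParse at this
    unfold parseB
    match hs : PySem.Str.split? line " " with
    | some [op', arg'] =>
      simp only [hs] at this
      match ho : PySem.Int.ofStr? arg' with
      | some a' => simp [ho, ih', List.map_cons, pvParse, hs]
      | none => simp [ho] at this
    | none => simp [hs] at this
    | some [] => simp [hs] at this
    | some [x] => simp [hs] at this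
    | some (x :: y :: z :: t) => simp [hs] at this

-- a Nodup Int list with elements in [0, n) has length ≤ n
theorem nodup_bounded_length (l : List Int) (n : Nat) (hnd : l.Nodup)
    (hmem : ∀ x ∈ l, 0 ≤ x ∧ x < (n : Int)) : l.length ≤ n := by
  have h1 : l.toFinset ⊆ Finset.Ico (0:Int) (n:Int) := by
    intro x hx
    rw [List.mem_toFinset] at hx
    rcases hmem x hx with ⟨h2, h3⟩
    rw [Finset.mem_Ico]; exact ⟨h2, h3⟩
  have h2 := Finset.card_le_card h1
  rw [List.toFinset_card_of_nodup hnd] at h2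
  rw [Int.card_Ico] at h2
  omega

-- runSet is a PROOF-SIDE restatement of A's run loop over the parsed program with the
-- candidate treated as nop (some acc = terminates with acc, none = loop detected / no fuel)
def runSet (prog : List (String × Int)) (skip : Int) : Nat → Int → Int → PySem.Set Int → Option Int
  | 0, _, _, _ => none
  | fuel+1, pc, acc, seen =>
    match PySem.List.pyGet? prog pc with
    | none => none
    | some (op0, arg) =>
      let op := if pc == skip then "nop" else op0
      let s :=
        if op == "acc" then (pc + 1, acc + arg)
        else if op == "jmp" then (pc + arg, acc)
        else if op == "nop" then (pc + 1, acc)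
        else (pc, acc)
      if (prog.length : Int) ≤ s.1 then some s.2
      else if PySem.Set.contains seen s.1 then none
      else runSet prog skip fuel s.1 s.2 (PySem.Set.add seen s.1)

-- core bridge: one trial run of A on the spliced string program equals runSet on the parsed
-- program with the swapped index treated as nop
theorem run_eq (instructions : List String) (i : Int)
    (hWF : instructions.all (fun s => (pvParse s).isSome) = true)
    (hJ : ∀ (k : Nat) (hk : k < instructions.length) (a : Int),
       pvParse instructions[k] = some ("jmp", a) → 0 ≤ (k : Int) + a)
    (hi0 : 0 ≤ i) (hin : i < (instructions.length : Int)) :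
    ∀ (fuel : Nat) (pc acc : Int) (hist : PySem.Set Int),
      0 ≤ pc → pc < (instructions.length : Int) →
      hist.Nodup → (∀ x ∈ hist, 0 ≤ x ∧ x < (instructions.length : Int)) →
      instructions.length + 2 ≤ fuel + hist.length →
      ∃ r : Bool × Int,
        runA (instructions.set i.toNat "nop +0") fuel pc acc hist = some r ∧
        runSet (instructions.map (fun s => (pvParse s).getD ("", 0))) i fuel pc acc hist
          = (if r.1 then some r.2 else none) := by
  intro fuel
  induction fuel with
  | zero =>
    intro pc acc hist _ _ hnd hmem hfuel
    exfalso
    have := nodup_bounded_length hist instructions.length hnd hmem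
    omega
  | succ f ih =>
    intro pc acc hist hpc0 hpcn hnd hmem hfuel
    have hL : (instructions.set i.toNat "nop +0").length = instructions.length := by
      simp
    have hP : (instructions.map (fun s => (pvParse s).getD ("", 0))).length
        = instructions.length := by simp
    have hlenhist := nodup_bounded_length hist instructions.length hnd hmem
    have hpcnat : pc.toNat < instructions.length := by omega
    have key : ∀ pcn accn : Int, 0 ≤ pcn →
      ∃ r : Bool × Int,
        (if PySem.Set.contains hist pcn then some (false, accn)
         else runA (instructions.set i.toNat "nop +0") f pcn accn
                (PySem.Set.add hist pcn)) = some r ∧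
        (if ((instructions.map (fun s => (pvParse s).getD ("", 0))).length : Int) ≤ pcn
           then some accn
         else if PySem.Set.contains hist pcn then none
         else runSet (instructions.map (fun s => (pvParse s).getD ("", 0))) i f pcn accn
                (PySem.Set.add hist pcn)) = (if r.1 then some r.2 else none) := by
      intro pcn accn hpcn0
      by_cases hc : PySem.Set.contains hist pcn = true
      · have hin : pcn ∈ hist := (PySem.Set.contains_iff hist pcn).mp hc
        have hb := hmem pcn hin
        refine ⟨(false, accn), by rw [if_pos hc], ?_⟩
        rw [if_neg (show ¬(((instructions.map (fun s => (pvParse s).getD ("", 0))).length : Int) ≤ pcn) by rw [hP]; omega)]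
        rw [if_pos hc]
        simp
      · have hnotin : pcn ∉ hist := fun h => hc ((PySem.Set.contains_iff hist pcn).mpr h)
        have hadd : PySem.Set.add hist pcn = hist ++ [pcn] := by
          unfold PySem.Set.add
          rw [if_neg hc]
        by_cases hend : (instructions.length : Int) ≤ pcn
        · obtain ⟨f', rfl⟩ : ∃ f'', f = f'' + 1 := ⟨f - 1, by omega⟩
          refine ⟨(true, accn), ?_, ?_⟩
          · rw [if_neg hc]
            show runA (instructions.set i.toNat "nop +0") (f' + 1) pcn accn _ = _
            unfold runA
            rw [if_neg (by rw [hL]; omega)]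
          · rw [if_pos (by rw [hP]; exact hend)]
            simp
        · rw [if_neg hc]
          rw [if_neg (show ¬(((instructions.map (fun s => (pvParse s).getD ("", 0))).length : Int) ≤ pcn) by rw [hP]; omega)]
          rw [if_neg hc]
          apply ih pcn accn (PySem.Set.add hist pcn) hpcn0 (by omega)
          · rw [hadd]
            exact List.Nodup.append hnd (List.nodup_singleton pcn)
                (by simp [List.disjoint_singleton, hnotin])
          · intro x hx
            rw [hadd, List.mem_append, List.mem_singleton] at hx
            rcases hx with hx | rfl
            · exact hmem x hx
            · exact ⟨hpcn0, by omega⟩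
          · rw [hadd]
            simp only [List.length_append, List.length_singleton]
            omega
    have hgetA : PySem.List.pyGet? (instructions.set i.toNat "nop +0") pc
        = some ((instructions.set i.toNat "nop +0")[pc.toNat]'(by omega)) :=
      PySem.List.pyGet?_eq_some_getElem _ hpc0 (by rw [hL]; exact hpcn)
    have hgetB : PySem.List.pyGet? (instructions.map (fun s => (pvParse s).getD ("", 0))) pc
        = some ((pvParse (instructions[pc.toNat]'hpcnat)).getD ("", 0)) := by
      rw [PySem.List.pyGet?_eq_some_getElem _ hpc0 (by rw [hP]; exact hpcn)]
      congr 1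
      simp
    have hsome := List.all_eq_true.mp hWF _ (List.getElem_mem hpcnat)
    obtain ⟨⟨op, a⟩, hpa⟩ := Option.isSome_iff_exists.mp (by simpa using hsome)
    by_cases hpi : pc = i
    · subst hpi
      have hcell : (instructions.set pc.toNat "nop +0")[pc.toNat]'(by omega) = "nop +0" :=
        List.getElem_set_self _
      unfold runA runSet
      rw [if_pos (by rw [hL]; exact hpcn)]
      rw [hgetA, hcell, hgetB]
      have hdec : decodeA "nop +0" = some ("nop", 0) := by decide
      have hbeq : (pc == pc) = true := by simp
      simp only [hdec, hbeq]
      simpa using key (pc + 1) acc (by omega)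
    · have hnat : i.toNat ≠ pc.toNat := by omega
      have hcell : (instructions.set i.toNat "nop +0")[pc.toNat]'(by omega)
          = instructions[pc.toNat]'hpcnat := List.getElem_set_ne hnat _
      unfold runA runSet
      rw [if_pos (by rw [hL]; exact hpcn)]
      rw [hgetA, hcell, hgetB]
      have hbeq : (pc == i) = false := by simp [hpi]
      simp only [decodeA_eq_pvParse, hpa, Option.getD_some, hbeq, Bool.false_eq_true, if_false]
      by_cases hop1 : op = "nop"
      · simpa [hop1] using key (pc + 1) acc (by omega)
      · by_cases hop2 : op = "acc"
        · simpa [hop2] using key (pc + 1) (acc + a) (by omega)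
        · by_cases hop3 : op = "jmp"
          · have hj := hJ pc.toNat hpcnat a (by rw [← hop3]; exact hpa)
            simpa [hop1, hop2, hop3] using key (pc + a) acc (by omega)
          · simpa [hop1, hop2, hop3] using key pc acc hpc0

-- ===== the pure step function and its trajectory =====

-- the one-step transition of the (possibly flipped) program; total (absorbing at exit,
-- identity where the fetch would fail — unreachable under the invariants below)
def Fstep (prog : List (String × Int)) (i : Int) (s : Int × Int) : Int × Int :=
  if (prog.length : Int) ≤ s.1 then s
  else
    match PySem.List.pyGet? prog s.1 with
    | none => s
    | some (op, arg) =>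
      if s.1 == i || op == "nop" then (s.1 + 1, s.2)
      else if op == "acc" then (s.1 + 1, s.2 + arg)
      else if op == "jmp" then (s.1 + arg, s.2)
      else s

-- the jmp-target side condition at the parsed-program level
def HJ (prog : List (String × Int)) : Prop :=
  ∀ (k : Nat) (a : Int), prog[k]? = some ("jmp", a) → 0 ≤ (k : Int) + a

-- pc-component depends only on pc
theorem Fstep_fst (prog : List (String × Int)) (i : Int) (s : Int × Int) :
    (Fstep prog i s).1 = (Fstep prog i (s.1, 0)).1 := by
  unfold Fstep
  by_cases h : (prog.length : Int) ≤ s.1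
  · simp [h]
  · simp only [h, if_false]
    cases hg : PySem.List.pyGet? prog s.1 with
    | none => simp
    | some p =>
      obtain ⟨op, arg⟩ := p
      by_cases h1 : (s.1 == i || op == "nop") = true
      · simp [h1]
      · by_cases h2 : (op == "acc") = true
        · simp [h1, h2]
        · by_cases h3 : (op == "jmp") = true
          · simp [h1, h2, h3]
          · simp [h1, h2, h3]

theorem Fstep_nonneg (prog : List (String × Int)) (i : Int) (hJ : HJ prog)
    (s : Int × Int) (h : 0 ≤ s.1) : 0 ≤ (Fstep prog i s).1 := by
  unfold Fstep
  by_cases hend : (prog.length : Int) ≤ s.1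
  · simpa [hend] using h
  · simp only [hend, if_false]
    have hlt : s.1.toNat < prog.length := by omega
    have hget : PySem.List.pyGet? prog s.1 = some (prog[s.1.toNat]'hlt) :=
      PySem.List.pyGet?_eq_some_getElem _ h (by omega)
    rcases hpe : prog[s.1.toNat]'hlt with ⟨op, arg⟩
    rw [hpe] at hget
    rw [hget]
    by_cases h1 : (s.1 == i || op == "nop") = true
    · simp [h1]; omega
    · by_cases h2 : (op == "acc") = true
      · simp [h1, h2]; omega
      · by_cases h3 : (op == "jmp") = true
        · have hj : 0 ≤ (s.1.toNat : Int) + arg := by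
            apply hJ s.1.toNat arg
            rw [List.getElem?_eq_getElem hlt, hpe]
            simp only [beq_iff_eq] at h3
            rw [h3]
          simp only [h1, Bool.false_eq_true, if_false, h2, h3, if_true]
          omega
        · simp [h1, h2, h3]; omega

theorem iter_nonneg (prog : List (String × Int)) (i : Int) (hJ : HJ prog)
    (s : Int × Int) (h : 0 ≤ s.1) (k : Nat) : 0 ≤ ((Fstep prog i)^[k] s).1 := by
  induction k with
  | zero => simpa using h
  | succ k ih =>
    rw [Function.iterate_succ_apply']
    exact Fstep_nonneg prog i hJ _ ih

-- absorbing at exit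
theorem Fstep_absorb (prog : List (String × Int)) (i : Int) (s : Int × Int)
    (h : (prog.length : Int) ≤ s.1) : Fstep prog i s = s := by
  unfold Fstep
  simp [h]

theorem iter_absorb (prog : List (String × Int)) (i : Int) (s : Int × Int) (K : Nat)
    (h : (prog.length : Int) ≤ ((Fstep prog i)^[K] s).1) :
    ∀ m, K ≤ m → (Fstep prog i)^[m] s = (Fstep prog i)^[K] s := by
  have key : ∀ t, (Fstep prog i)^[K + t] s = (Fstep prog i)^[K] s := by
    intro t
    induction t with
    | zero => rfl
    | succ t ih =>
      have : K + (t + 1) = (K + t) + 1 := by omega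
      rw [this, Function.iterate_succ_apply', ih, Fstep_absorb prog i _ h]
  intro m hm
  have : m = K + (m - K) := by omega
  rw [this, key]

-- pc-trajectory of the pair iterate is the iterate of the pc-only map
theorem iter_fst (prog : List (String × Int)) (i : Int) (s : Int × Int) (k : Nat) :
    ((Fstep prog i)^[k] s).1 = (fun p => (Fstep prog i (p, 0)).1)^[k] s.1 := by
  induction k generalizing s with
  | zero => rfl
  | succ k ih =>
    rw [Function.iterate_succ_apply', Function.iterate_succ_apply']
    rw [Fstep_fst, ih s]

-- from a repeated pc on, every later pc already occurs before the repeat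
theorem values_in_window (f : Int → Int) (x : Int) (a b : Nat)
    (hab : a < b) (hrep : f^[a] x = f^[b] x) :
    ∀ m, ∃ j, j < b ∧ f^[m] x = f^[j] x := by
  intro m
  induction m using Nat.strong_induction_on with
  | _ m ih =>
    by_cases hm : m < b
    · exact ⟨m, hm, rfl⟩
    · have hd : 0 < b - a := by omega
      have harith : m = (m - b) + b := by omega
      have h1 : f^[m] x = f^[(m - b) + a] x := by
        conv_lhs => rw [harith]
        rw [Function.iterate_add_apply, ← hrep, ← Function.iterate_add_apply]
      have h2 : (m - b) + a < m := by omega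
      obtain ⟨j, hj, he⟩ := ih ((m - b) + a) h2
      exact ⟨j, hj, by rw [h1, he]⟩

-- a repeated pc with no exit up to the repeat means the pc-iterates never exit
theorem no_exit_of_repeat (f : Int → Int) (x : Int) (n : Int) (a b : Nat)
    (hab : a < b) (hrep : f^[a] x = f^[b] x) (hlt : ∀ k, k ≤ b → f^[k] x < n) :
    ∀ m, f^[m] x < n := by
  intro m
  obtain ⟨j, hj, he⟩ := values_in_window f x a b hab hrep m
  rw [he]
  exact hlt j (by omega)

-- before (and at) a first exit all pcs are distinct
theorem first_exit_nodup (f : Int → Int) (x : Int) (n : Int) (M : Nat)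
    (hM : n ≤ f^[M] x) (hlt : ∀ k, k < M → f^[k] x < n) :
    ∀ a b, a < b → b ≤ M → f^[a] x ≠ f^[b] x := by
  intro a b hab hbM heq
  by_cases hb : b = M
  · subst hb
    have := hlt a (by omega)
    omega
  · have hbM' : b < M := by omega
    have := no_exit_of_repeat f x n a b hab heq (fun k hk => hlt k (by omega)) M
    omega

-- an injective Int-valued sequence with values in [0, n) has at most n entries
theorem inj_bounded_le (g : Nat → Int) (k n : Nat)
    (hdist : ∀ a b, a < b → b < k → g a ≠ g b)
    (hmem : ∀ j, j < k → 0 ≤ g j ∧ g j < (n : Int)) : k ≤ n := by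
  have hnd : ((List.range k).map g).Nodup := by
    refine List.Nodup.map_on ?_ (List.nodup_range)
    intro a ha b hb hab
    rw [List.mem_range] at ha hb
    rcases Nat.lt_trichotomy a b with h | h | h
    · exact absurd hab (hdist a b h hb)
    · exact h
    · exact absurd hab.symm (hdist b a h ha)
  have := nodup_bounded_length ((List.range k).map g) n hnd (by
    intro x hx
    rw [List.mem_map] at hx
    obtain ⟨j, hj, rfl⟩ := hx
    rw [List.mem_range] at hj
    exact hmem j hj)
  simpa using this

-- a first exit happens within n steps
theorem first_exit_le (f : Int → Int) (x : Int) (n : Nat) (M : Nat)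
    (hM : (n : Int) ≤ f^[M] x) (hlt : ∀ k, k < M → f^[k] x < (n : Int))
    (hnn : ∀ k, 0 ≤ f^[k] x) : M ≤ n := by
  apply inj_bounded_le (fun k => f^[k] x) M n
  · intro a b hab hb
    exact first_exit_nodup f x (n : Int) M hM hlt a b hab (by omega)
  · intro j hj
    exact ⟨hnn j, hlt j hj⟩

-- ===== one-iteration unfoldings in terms of Fstep =====

theorem runSet_succ (prog : List (String × Int)) (i : Int) (fuel : Nat) (pc acc : Int)
    (seen : PySem.Set Int) (h0 : 0 ≤ pc) (hlt : pc < (prog.length : Int)) :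
    runSet prog i (fuel + 1) pc acc seen =
      (if (prog.length : Int) ≤ (Fstep prog i (pc, acc)).1 then some (Fstep prog i (pc, acc)).2
       else if PySem.Set.contains seen (Fstep prog i (pc, acc)).1 then none
       else runSet prog i fuel (Fstep prog i (pc, acc)).1 (Fstep prog i (pc, acc)).2
              (PySem.Set.add seen (Fstep prog i (pc, acc)).1)) := by
  have hnat : pc.toNat < prog.length := by omega
  have hget : PySem.List.pyGet? prog pc = some (prog[pc.toNat]'hnat) :=
    PySem.List.pyGet?_eq_some_getElem _ h0 (by omega)
  rcases hpe : prog[pc.toNat]'hnat with ⟨op, arg⟩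
  rw [hpe] at hget
  have hF : Fstep prog i (pc, acc) =
      (if pc == i || op == "nop" then (pc + 1, acc)
       else if op == "acc" then (pc + 1, acc + arg)
       else if op == "jmp" then (pc + arg, acc)
       else (pc, acc)) := by
    unfold Fstep
    rw [if_neg (by omega : ¬ (prog.length : Int) ≤ (pc, acc).1)]
    rw [show PySem.List.pyGet? prog (pc, acc).1 = some (op, arg) from hget]
  show (match PySem.List.pyGet? prog pc with
    | none => none
    | some (op0, arg) =>
      let op := if pc == i then "nop" else op0
      let s :=
        if op == "acc" then (pc + 1, acc + arg)
        else if op == "jmp" then (pc + arg, acc)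
        else if op == "nop" then (pc + 1, acc)
        else (pc, acc)
      if (prog.length : Int) ≤ s.1 then some s.2
      else if PySem.Set.contains seen s.1 then none
      else runSet prog i fuel s.1 s.2 (PySem.Set.add seen s.1)) = _
  rw [hget]
  have hs : (let op := if pc == i then "nop" else op;
      if op == "acc" then (pc + 1, acc + arg)
      else if op == "jmp" then (pc + arg, acc)
      else if op == "nop" then (pc + 1, acc)
      else (pc, acc)) = Fstep prog i (pc, acc) := by
    rw [hF]
    by_cases h1 : (pc == i) = true
    · simp [h1]
    · by_cases h2 : (op == "nop") = true
      · simp only [beq_iff_eq] at h2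
        simp [h1, h2]
      · by_cases h3 : (op == "acc") = true
        · simp only [beq_iff_eq] at h3
          simp [h1, h3]
        · by_cases h4 : (op == "jmp") = true
          · simp only [beq_iff_eq] at h4
            simp [h1, h4]
          · simp only [beq_iff_eq] at h2 h3 h4
            simp [h1, h2, h3, h4]
  simp only [hs]

theorem walkB_succ (prog : List (String × Int)) (i : Int) (fuel : Nat) (pc acc : Int)
    (h0 : 0 ≤ pc) :
    walkB prog i (fuel + 1) pc acc =
      (if (prog.length : Int) ≤ pc then some (some acc)
       else walkB prog i fuel (Fstep prog i (pc, acc)).1 (Fstep prog i (pc, acc)).2) := by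
  by_cases hend : (prog.length : Int) ≤ pc
  · rw [if_pos hend]
    show (if (prog.length : Int) ≤ pc then some (some acc) else _) = _
    rw [if_pos hend]
  · rw [if_neg hend]
    have hnat : pc.toNat < prog.length := by omega
    have hget : PySem.List.pyGet? prog pc = some (prog[pc.toNat]'hnat) :=
      PySem.List.pyGet?_eq_some_getElem _ h0 (by omega)
    rcases hpe : prog[pc.toNat]'hnat with ⟨op, arg⟩
    rw [hpe] at hget
    have hF : Fstep prog i (pc, acc) =
        (if pc == i || op == "nop" then (pc + 1, acc)
         else if op == "acc" then (pc + 1, acc + arg)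
         else if op == "jmp" then (pc + arg, acc)
         else (pc, acc)) := by
      unfold Fstep
      rw [if_neg (by omega : ¬ (prog.length : Int) ≤ (pc, acc).1)]
      rw [show PySem.List.pyGet? prog (pc, acc).1 = some (op, arg) from hget]
    show (if (prog.length : Int) ≤ pc then some (some acc)
      else match PySem.List.pyGet? prog pc with
        | none => none
        | some (op, arg) =>
          let s :=
            if pc == i || op == "nop" then (pc + 1, acc)
            else if op == "acc" then (pc + 1, acc + arg)
            else if op == "jmp" then (pc + arg, acc)
            else (pc, acc)
          walkB prog i fuel s.1 s.2) = _
    rw [if_neg hend, hget, hF]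

theorem preRunB_succ (prog : List (String × Int)) (fuel : Nat) (pc acc : Int)
    (d : PySem.Dict Int Int) (h0 : 0 ≤ pc) :
    preRunB prog (fuel + 1) pc acc d =
      (if (decide (pc < (prog.length : Int)) && !(d.contains pc)) = true then
        preRunB prog fuel (Fstep prog (-1) (pc, acc)).1 (Fstep prog (-1) (pc, acc)).2
          (d.insert pc acc)
       else some (d, pc, acc)) := by
  by_cases hc : (decide (pc < (prog.length : Int)) && !(d.contains pc)) = true
  · rw [if_pos hc]
    have hlt : pc < (prog.length : Int) := by
      rcases Bool.and_eq_true_iff.mp hc with ⟨h1, _⟩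
      exact of_decide_eq_true h1
    have hnat : pc.toNat < prog.length := by omega
    have hget : PySem.List.pyGet? prog pc = some (prog[pc.toNat]'hnat) :=
      PySem.List.pyGet?_eq_some_getElem _ h0 (by omega)
    rcases hpe : prog[pc.toNat]'hnat with ⟨op, arg⟩
    rw [hpe] at hget
    have hni : (pc == (-1 : Int)) = false := by
      simp only [beq_eq_false_iff_ne, ne_eq]
      omega
    have hF : Fstep prog (-1) (pc, acc) =
        (if op == "acc" then (pc + 1, acc + arg)
         else if op == "jmp" then (pc + arg, acc)
         else if op == "nop" then (pc + 1, acc)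
         else (pc, acc)) := by
      unfold Fstep
      rw [if_neg (by omega : ¬ (prog.length : Int) ≤ (pc, acc).1)]
      rw [show PySem.List.pyGet? prog (pc, acc).1 = some (op, arg) from hget]
      show (if (pc == (-1 : Int) || op == "nop") = true then _ else _) = _
      rw [hni]
      by_cases h2 : (op == "nop") = true
      · simp only [beq_iff_eq] at h2
        simp [h2]
      · by_cases h3 : (op == "acc") = true
        · simp only [beq_iff_eq] at h3
          simp [h3]
        · by_cases h4 : (op == "jmp") = true
          · simp only [beq_iff_eq] at h4
            simp [h4]
          · simp only [beq_iff_eq] at h2 h3 h4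
            simp [h2, h3, h4]
    show (if pc < (prog.length : Int) && !(d.contains pc) then
        match PySem.List.pyGet? prog pc with
        | none => none
        | some (op, arg) =>
          let s :=
            if op == "acc" then (pc + 1, acc + arg)
            else if op == "jmp" then (pc + arg, acc)
            else if op == "nop" then (pc + 1, acc)
            else (pc, acc)
          preRunB prog fuel s.1 s.2 (d.insert pc acc)
      else some (d, pc, acc)) = _
    rw [if_pos hc, hget, hF]
  · rw [if_neg hc]
    show (if pc < (prog.length : Int) && !(d.contains pc) then _ else some (d, pc, acc)) = _
    rw [if_neg hc]

-- ===== runSet against the trajectory =====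

theorem runSet_exit (prog : List (String × Int)) (i : Int) (hJ : HJ prog) :
    ∀ (M : Nat) (pc acc : Int) (seen : PySem.Set Int) (fuel : Nat),
      0 ≤ pc → 1 ≤ M → M ≤ fuel →
      (prog.length : Int) ≤ ((Fstep prog i)^[M] (pc, acc)).1 →
      (∀ k, k < M → ((Fstep prog i)^[k] (pc, acc)).1 < (prog.length : Int)) →
      (∀ a b, a < b → b ≤ M →
        ((Fstep prog i)^[a] (pc, acc)).1 ≠ ((Fstep prog i)^[b] (pc, acc)).1) →
      (∀ k, 1 ≤ k → k ≤ M → ((Fstep prog i)^[k] (pc, acc)).1 ∉ seen) →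
      runSet prog i fuel pc acc seen = some (((Fstep prog i)^[M] (pc, acc)).2) := by
  intro M
  induction M with
  | zero => intro pc acc seen fuel _ h1 _ _ _ _ _; omega
  | succ M ih =>
    intro pc acc seen fuel h0 h1 hfuel hexit hlt hnd hseen
    obtain ⟨f, rfl⟩ : ∃ f, fuel = f + 1 := ⟨fuel - 1, by omega⟩
    have hpc : pc < (prog.length : Int) := by simpa using hlt 0 (by omega)
    rw [runSet_succ prog i f pc acc seen h0 hpc]
    have hshift : ∀ k, (Fstep prog i)^[k] (Fstep prog i (pc, acc))
        = (Fstep prog i)^[k + 1] (pc, acc) := by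
      intro k
      rw [Function.iterate_succ_apply]
    cases M with
    | zero =>
      have hx : (prog.length : Int) ≤ (Fstep prog i (pc, acc)).1 := by
        have := hexit
        rwa [show (Fstep prog i)^[1] (pc, acc) = Fstep prog i (pc, acc) from
          congrFun (Function.iterate_one _) _] at this
      rw [if_pos hx]
      rw [show (Fstep prog i)^[1] (pc, acc) = Fstep prog i (pc, acc) from
        congrFun (Function.iterate_one _) _]
    | succ M' =>
      have hstep_lt : (Fstep prog i (pc, acc)).1 < (prog.length : Int) := by
        have := hlt 1 (by omega)
        rwa [show (Fstep prog i)^[1] (pc, acc) = Fstep prog i (pc, acc) from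
          congrFun (Function.iterate_one _) _] at this
      have hstep_notin : (Fstep prog i (pc, acc)).1 ∉ seen := by
        have := hseen 1 (by omega) (by omega)
        rwa [show (Fstep prog i)^[1] (pc, acc) = Fstep prog i (pc, acc) from
          congrFun (Function.iterate_one _) _] at this
      rw [if_neg (by omega)]
      rw [if_neg (fun hcc => hstep_notin ((PySem.Set.contains_iff _ _).mp hcc))]
      have goal2 := ih (Fstep prog i (pc, acc)).1 (Fstep prog i (pc, acc)).2
        (PySem.Set.add seen (Fstep prog i (pc, acc)).1) f
        (Fstep_nonneg prog i hJ _ h0) (by omega) (by omega)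
        (by rw [hshift]; exact hexit)
        (by intro k hk; rw [hshift]; exact hlt (k + 1) (by omega))
        (by intro a b hab hb; rw [hshift, hshift]; exact hnd (a+1) (b+1) (by omega) (by omega))
        (by
          intro k hk1 hk2 hmem
          rw [hshift] at hmem
          rcases (PySem.Set.mem_add _ _ _).mp hmem with h | h
          · exact hseen (k+1) (by omega) (by omega) h
          · rw [← Function.iterate_one (Fstep prog i)] at h
            exact hnd 1 (k+1) (by omega) (by omega) h.symm)
      rw [goal2, hshift]

theorem runSet_noexit (prog : List (String × Int)) (i : Int) (hJ : HJ prog) :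
    ∀ (fuel : Nat) (pc acc : Int) (seen : PySem.Set Int),
      0 ≤ pc →
      (∀ k, ((Fstep prog i)^[k] (pc, acc)).1 < (prog.length : Int)) →
      runSet prog i fuel pc acc seen = none := by
  intro fuel
  induction fuel with
  | zero => intros; rfl
  | succ f ih =>
    intro pc acc seen h0 hlt
    have hpc : pc < (prog.length : Int) := by simpa using hlt 0
    rw [runSet_succ prog i f pc acc seen h0 hpc]
    have hshift : ∀ k, (Fstep prog i)^[k] (Fstep prog i (pc, acc))
        = (Fstep prog i)^[k + 1] (pc, acc) := by
      intro k
      rw [Function.iterate_succ_apply]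
    have hstep_lt : (Fstep prog i (pc, acc)).1 < (prog.length : Int) := by
      have := hlt 1
      rwa [show (Fstep prog i)^[1] (pc, acc) = Fstep prog i (pc, acc) from
          congrFun (Function.iterate_one _) _] at this
    rw [if_neg (by omega)]
    by_cases hcc : PySem.Set.contains seen (Fstep prog i (pc, acc)).1 = true
    · rw [if_pos hcc]
    · rw [if_neg hcc]
      exact ih _ _ _ (Fstep_nonneg prog i hJ _ h0)
        (fun k => by rw [hshift]; exact hlt (k + 1))

-- ===== walkB against the trajectory =====

theorem walkB_exit (prog : List (String × Int)) (i : Int) (hJ : HJ prog) :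
    ∀ (M : Nat) (pc acc : Int) (fuel : Nat),
      0 ≤ pc → M < fuel →
      (prog.length : Int) ≤ ((Fstep prog i)^[M] (pc, acc)).1 →
      (∀ k, k < M → ((Fstep prog i)^[k] (pc, acc)).1 < (prog.length : Int)) →
      walkB prog i fuel pc acc = some (some (((Fstep prog i)^[M] (pc, acc)).2)) := by
  intro M
  induction M with
  | zero =>
    intro pc acc fuel h0 hfuel hexit _
    obtain ⟨f, rfl⟩ : ∃ f, fuel = f + 1 := ⟨fuel - 1, by omega⟩
    rw [walkB_succ prog i f pc acc h0]
    rw [if_pos (by simpa using hexit)]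
    simp
  | succ M ih =>
    intro pc acc fuel h0 hfuel hexit hlt
    obtain ⟨f, rfl⟩ : ∃ f, fuel = f + 1 := ⟨fuel - 1, by omega⟩
    have hpc : pc < (prog.length : Int) := by simpa using hlt 0 (by omega)
    rw [walkB_succ prog i f pc acc h0]
    rw [if_neg (by omega)]
    have hshift : ∀ k, (Fstep prog i)^[k] (Fstep prog i (pc, acc))
        = (Fstep prog i)^[k + 1] (pc, acc) := by
      intro k
      rw [Function.iterate_succ_apply]
    have goal2 := ih (Fstep prog i (pc, acc)).1 (Fstep prog i (pc, acc)).2 f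
      (Fstep_nonneg prog i hJ _ h0) (by omega)
      (by rw [hshift]; exact hexit)
      (by intro k hk; rw [hshift]; exact hlt (k + 1) (by omega))
    rw [goal2, hshift]

theorem walkB_noexit (prog : List (String × Int)) (i : Int) (hJ : HJ prog) :
    ∀ (fuel : Nat) (pc acc : Int),
      0 ≤ pc →
      (∀ k, k < fuel → ((Fstep prog i)^[k] (pc, acc)).1 < (prog.length : Int)) →
      walkB prog i fuel pc acc = some none := by
  intro fuel
  induction fuel with
  | zero => intros; rfl
  | succ f ih =>
    intro pc acc h0 hlt
    have hpc : pc < (prog.length : Int) := by simpa using hlt 0 (by omega)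
    rw [walkB_succ prog i f pc acc h0]
    rw [if_neg (by omega)]
    have hshift : ∀ k, (Fstep prog i)^[k] (Fstep prog i (pc, acc))
        = (Fstep prog i)^[k + 1] (pc, acc) := by
      intro k
      rw [Function.iterate_succ_apply]
    exact ih _ _ (Fstep_nonneg prog i hJ _ h0)
      (fun k hk => by rw [hshift]; exact hlt (k + 1) (by omega))

-- ===== preRunB against the original trajectory =====

-- the original program's step is Fstep with an impossible flip index
theorem preRunB_spec (prog : List (String × Int)) (hJ : HJ prog) :
    ∀ (fuel k : Nat) (d : PySem.Dict Int Int),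
      (∀ x a, d.get? x = some a ↔ ∃ j, j < k ∧ ((Fstep prog (-1))^[j] (0, 0)).1 = x ∧
        (∀ j', j' < j → ((Fstep prog (-1))^[j'] (0, 0)).1 ≠ x) ∧
        a = ((Fstep prog (-1))^[j] (0, 0)).2) →
      (∀ a b, a < b → b < k →
        ((Fstep prog (-1))^[a] (0, 0)).1 ≠ ((Fstep prog (-1))^[b] (0, 0)).1) →
      (∀ j, j < k → ((Fstep prog (-1))^[j] (0, 0)).1 < (prog.length : Int)) →
      prog.length + 1 ≤ fuel + k →
      ∃ (K : Nat) (d' : PySem.Dict Int Int), k ≤ K ∧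
        preRunB prog fuel (((Fstep prog (-1))^[k] (0, 0)).1)
            (((Fstep prog (-1))^[k] (0, 0)).2) d
          = some (d', ((Fstep prog (-1))^[K] (0, 0)).1, ((Fstep prog (-1))^[K] (0, 0)).2) ∧
        (∀ x a, d'.get? x = some a ↔ ∃ j, j < K ∧ ((Fstep prog (-1))^[j] (0, 0)).1 = x ∧
          (∀ j', j' < j → ((Fstep prog (-1))^[j'] (0, 0)).1 ≠ x) ∧
          a = ((Fstep prog (-1))^[j] (0, 0)).2) ∧
        (∀ a b, a < b → b < K →
          ((Fstep prog (-1))^[a] (0, 0)).1 ≠ ((Fstep prog (-1))^[b] (0, 0)).1) ∧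
        (∀ j, j < K → ((Fstep prog (-1))^[j] (0, 0)).1 < (prog.length : Int)) ∧
        ((prog.length : Int) ≤ ((Fstep prog (-1))^[K] (0, 0)).1 ∨
          ∃ j, j < K ∧ ((Fstep prog (-1))^[j] (0, 0)).1 = ((Fstep prog (-1))^[K] (0, 0)).1) := by
  intro fuel
  induction fuel with
  | zero =>
    intro k d hd hdist hlt hfuel
    exfalso
    have hk : k ≤ prog.length := inj_bounded_le
      (fun j => ((Fstep prog (-1))^[j] (0, 0)).1) k prog.length
      (fun a b hab hb => hdist a b hab hb)
      (fun j hj => ⟨iter_nonneg prog (-1) hJ (0, 0) (by simp) j, hlt j hj⟩)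
    omega
  | succ f ih =>
    intro k d hd hdist hlt hfuel
    have h0k : 0 ≤ ((Fstep prog (-1))^[k] (0, 0)).1 :=
      iter_nonneg prog (-1) hJ (0, 0) (by simp) k
    have hcontains_of_occ : ∀ x, (∃ j, j < k ∧ ((Fstep prog (-1))^[j] (0, 0)).1 = x) →
        d.contains x = true := by
      intro x hx
      have hex : ∃ j, ((Fstep prog (-1))^[j] (0, 0)).1 = x ∧ j < k := by
        obtain ⟨j, hj, he⟩ := hx
        exact ⟨j, he, hj⟩
      set j0 := Nat.find hex with hj0
      obtain ⟨hje, hjk⟩ := Nat.find_spec hex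
      have hmin : ∀ j', j' < j0 → ((Fstep prog (-1))^[j'] (0, 0)).1 ≠ x := by
        intro j' hj' he
        exact Nat.find_min hex hj' ⟨he, by omega⟩
      have hg : d.get? x = some (((Fstep prog (-1))^[j0] (0, 0)).2) :=
        (hd x _).mpr ⟨j0, hjk, hje, hmin, rfl⟩
      rw [PySem.Dict.contains_eq_isSome_get?, hg]
      rfl
    rw [preRunB_succ prog f _ _ d h0k]
    by_cases hc : (decide ((((Fstep prog (-1))^[k] (0, 0)).1) < (prog.length : Int))
        && !(d.contains (((Fstep prog (-1))^[k] (0, 0)).1))) = true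
    · rw [if_pos hc]
      obtain ⟨hc1, hc2⟩ := Bool.and_eq_true_iff.mp hc
      have hcl : ((Fstep prog (-1))^[k] (0, 0)).1 < (prog.length : Int) :=
        of_decide_eq_true hc1
      have hfresh : d.contains (((Fstep prog (-1))^[k] (0, 0)).1) = false := by
        cases hb : d.contains (((Fstep prog (-1))^[k] (0, 0)).1) with
        | false => rfl
        | true => rw [hb] at hc2; exact absurd hc2 (by simp)
      have hnew : ∀ j, j < k →
          ((Fstep prog (-1))^[j] (0, 0)).1 ≠ ((Fstep prog (-1))^[k] (0, 0)).1 := by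
        intro j hj he
        have := hcontains_of_occ _ ⟨j, hj, he⟩
        rw [hfresh] at this
        exact Bool.false_ne_true this
      have hstate : Fstep prog (-1) (((Fstep prog (-1))^[k] (0, 0)).1,
          ((Fstep prog (-1))^[k] (0, 0)).2) = (Fstep prog (-1))^[k + 1] (0, 0) := by
        rw [Function.iterate_succ_apply']
      obtain ⟨K, d', hkK, hrun, hspec', hdist', hlt', hstop'⟩ := ih (k + 1)
        (d.insert (((Fstep prog (-1))^[k] (0, 0)).1) (((Fstep prog (-1))^[k] (0, 0)).2))
        (by
          intro x a
          rw [PySem.Dict.get?_insert]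
          by_cases hx : x = ((Fstep prog (-1))^[k] (0, 0)).1
          · rw [if_pos hx]
            constructor
            · intro hsa
              have ha : a = ((Fstep prog (-1))^[k] (0, 0)).2 := by
                injection hsa with h
                exact h.symm
              exact ⟨k, by omega, hx.symm, fun j' hj' he => hnew j' hj' (by rw [he, hx]), by rw [ha]⟩
            · rintro ⟨j, hj, hpj, hfirst, ha⟩
              rcases Nat.lt_or_ge j k with hjk | hjk
              · exact absurd (by rw [hpj, hx]) (hnew j hjk)
              · have : j = k := by omega
                subst this
                rw [ha]
          · rw [if_neg hx]
            rw [hd x a]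
            constructor
            · rintro ⟨j, hj, hpj, hfirst, ha⟩
              exact ⟨j, by omega, hpj, hfirst, ha⟩
            · rintro ⟨j, hj, hpj, hfirst, ha⟩
              have hjk : j < k := by
                rcases Nat.lt_or_ge j k with h | h
                · exact h
                · exfalso
                  have : j = k := by omega
                  subst this
                  exact hx hpj.symm
              exact ⟨j, hjk, hpj, hfirst, ha⟩)
        (by
          intro a b hab hb
          rcases Nat.lt_or_ge b k with h | h
          · exact hdist a b hab h
          · have : b = k := by omega
            subst this
            exact hnew a hab)
        (by
          intro j hj
          rcases Nat.lt_or_ge j k with h | h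
          · exact hlt j h
          · have : j = k := by omega
            subst this
            exact hcl)
        (by omega)
      rw [hstate]
      exact ⟨K, d', by omega, hrun, hspec', hdist', hlt', hstop'⟩
    · rw [if_neg hc]
      refine ⟨k, d, le_refl k, rfl, hd, hdist, hlt, ?_⟩
      by_cases hl : ((Fstep prog (-1))^[k] (0, 0)).1 < (prog.length : Int)
      · right
        have hct : d.contains (((Fstep prog (-1))^[k] (0, 0)).1) = true := by
          cases hb : d.contains (((Fstep prog (-1))^[k] (0, 0)).1) with
          | true => rfl
          | false =>
            exfalso
            apply hc
            rw [hb]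
            simp [hl]
        have hsome : (d.get? (((Fstep prog (-1))^[k] (0, 0)).1)).isSome = true := by
          rw [← PySem.Dict.contains_eq_isSome_get?]
          exact hct
        obtain ⟨a, ha⟩ := Option.isSome_iff_exists.mp hsome
        obtain ⟨j, hj, hpj, _, _⟩ := (hd _ a).mp ha
        exact ⟨j, hj, hpj⟩
      · left
        omega

-- where the pc differs from the flip index, the flipped step is the original step
theorem Fstep_ne_flip (prog : List (String × Int)) (i : Int) (s : Int × Int)
    (hne : s.1 ≠ i) (h0 : 0 ≤ s.1) : Fstep prog i s = Fstep prog (-1) s := by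
  unfold Fstep
  by_cases hend : (prog.length : Int) ≤ s.1
  · simp [hend]
  · simp only [hend, if_false]
    cases hg : PySem.List.pyGet? prog s.1 with
    | none => rfl
    | some p =>
      obtain ⟨op, arg⟩ := p
      have h1 : (s.1 == i) = false := by simpa using hne
      have h2 : (s.1 == (-1 : Int)) = false := by
        simp only [beq_eq_false_iff_ne, ne_eq]
        omega
      rw [h1, h2]

-- splice: while the flip index has not been executed, flipped and original trajectories agree
theorem splice_eq (prog : List (String × Int)) (i : Int) (hJ : HJ prog) (k : Nat)
    (hne : ∀ j, j < k → ((Fstep prog (-1))^[j] (0, 0)).1 ≠ i) :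
    (Fstep prog i)^[k] (0, 0) = (Fstep prog (-1))^[k] (0, 0) := by
  induction k with
  | zero => rfl
  | succ k ih =>
    rw [Function.iterate_succ_apply', Function.iterate_succ_apply']
    rw [ih (fun j hj => hne j (by omega))]
    exact Fstep_ne_flip prog i _ (hne k (by omega))
      (iter_nonneg prog (-1) hJ (0, 0) (by simp) k)

-- the instructions-level jmp condition transfers to the parsed program
theorem HJ_of (instructions : List String)
    (hWF : instructions.all (fun s => (pvParse s).isSome) = true)
    (hJ : ∀ (k : Nat) (hk : k < instructions.length) (a : Int),
       pvParse instructions[k] = some ("jmp", a) → 0 ≤ (k : Int) + a) :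
    HJ (instructions.map (fun s => (pvParse s).getD ("", 0))) := by
  intro k a hk
  have hkl : k < instructions.length := by
    by_contra h
    rw [List.getElem?_map, List.getElem?_eq_none (by omega)] at hk
    simp at hk
  rw [List.getElem?_map, List.getElem?_eq_getElem hkl] at hk
  simp only [Option.map_some, Option.some.injEq] at hk
  have hsome := List.all_eq_true.mp hWF _ (List.getElem_mem hkl)
  obtain ⟨⟨op, b⟩, hp⟩ := Option.isSome_iff_exists.mp (by simpa using hsome)
  rw [hp] at hk
  simp only [Option.getD_some, Prod.mk.injEq] at hk
  apply hJ k hkl a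
  rw [hp, hk.1, hk.2]

-- pair-state wrappers of the pc-level trajectory facts
theorem pair_nodup (prog : List (String × Int)) (i : Int) (s : Int × Int) (M : Nat)
    (hM : (prog.length : Int) ≤ ((Fstep prog i)^[M] s).1)
    (hlt : ∀ k, k < M → ((Fstep prog i)^[k] s).1 < (prog.length : Int)) :
    ∀ a b, a < b → b ≤ M → ((Fstep prog i)^[a] s).1 ≠ ((Fstep prog i)^[b] s).1 := by
  intro a b hab hb
  have h := first_exit_nodup (fun p => (Fstep prog i (p, 0)).1) s.1 (prog.length : Int) M
    (by rw [← iter_fst]; exact hM) (fun k hk => by rw [← iter_fst]; exact hlt k hk) a b hab hb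
  rw [iter_fst, iter_fst]
  exact h

theorem pair_exit_le (prog : List (String × Int)) (i : Int) (hJ : HJ prog)
    (s : Int × Int) (h0 : 0 ≤ s.1) (M : Nat)
    (hM : (prog.length : Int) ≤ ((Fstep prog i)^[M] s).1)
    (hlt : ∀ k, k < M → ((Fstep prog i)^[k] s).1 < (prog.length : Int)) :
    M ≤ prog.length := by
  apply first_exit_le (fun p => (Fstep prog i (p, 0)).1) s.1 prog.length M
  · rw [← iter_fst]; exact hM
  · intro k hk; rw [← iter_fst]; exact hlt k hk
  · intro k; rw [← iter_fst]; exact iter_nonneg prog i hJ s h0 k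

theorem pair_values_in_window (prog : List (String × Int)) (i : Int) (s : Int × Int)
    (a b : Nat) (hab : a < b)
    (hrep : ((Fstep prog i)^[a] s).1 = ((Fstep prog i)^[b] s).1) :
    ∀ m, ∃ j, j < b ∧ ((Fstep prog i)^[m] s).1 = ((Fstep prog i)^[j] s).1 := by
  intro m
  obtain ⟨j, hj, he⟩ := values_in_window (fun p => (Fstep prog i (p, 0)).1) s.1 a b hab
    (by rw [← iter_fst, ← iter_fst]; exact hrep) m
  refine ⟨j, hj, ?_⟩
  rw [iter_fst, iter_fst]
  exact he

theorem pair_no_exit_of_repeat (prog : List (String × Int)) (i : Int) (s : Int × Int)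
    (a b : Nat) (hab : a < b)
    (hrep : ((Fstep prog i)^[a] s).1 = ((Fstep prog i)^[b] s).1)
    (hlt : ∀ k, k ≤ b → ((Fstep prog i)^[k] s).1 < (prog.length : Int)) :
    ∀ m, ((Fstep prog i)^[m] s).1 < (prog.length : Int) := by
  intro m
  rw [iter_fst]
  exact no_exit_of_repeat (fun p => (Fstep prog i (p, 0)).1) s.1 (prog.length : Int) a b hab
    (by rw [← iter_fst, ← iter_fst]; exact hrep)
    (fun k hk => by rw [← iter_fst]; exact hlt k hk) m

-- the flipped step at the flip index is a plain nop
theorem Fstep_at_flip (prog : List (String × Int)) (i : Int) (s : Int × Int)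
    (h1 : s.1 = i) (h0 : 0 ≤ i) (hn : i < (prog.length : Int)) :
    Fstep prog i s = (i + 1, s.2) := by
  unfold Fstep
  rw [h1]
  rw [if_neg (by omega : ¬ (prog.length : Int) ≤ i)]
  have hnat : i.toNat < prog.length := by omega
  have hget : PySem.List.pyGet? prog i = some (prog[i.toNat]'hnat) :=
    PySem.List.pyGet?_eq_some_getElem _ h0 (by omega)
  rcases hpe : prog[i.toNat]'hnat with ⟨op, arg⟩
  rw [hpe] at hget
  rw [hget]
  simp

-- an occurrence before the stopping point puts the pc in the dictionary
theorem dict_isSome_of_occ (prog : List (String × Int)) (d : PySem.Dict Int Int) (K : Nat)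
    (hdspec : ∀ x a, d.get? x = some a ↔ ∃ j, j < K ∧ ((Fstep prog (-1))^[j] (0, 0)).1 = x ∧
      (∀ j', j' < j → ((Fstep prog (-1))^[j'] (0, 0)).1 ≠ x) ∧
      a = ((Fstep prog (-1))^[j] (0, 0)).2)
    (x : Int) (j : Nat) (hj : j < K) (he : ((Fstep prog (-1))^[j] (0, 0)).1 = x) :
    (d.get? x).isSome = true := by
  have hex : ∃ m, ((Fstep prog (-1))^[m] (0, 0)).1 = x := ⟨j, he⟩
  set j0 := Nat.find hex with hj0
  have hspec := Nat.find_spec hex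
  have hmin : ∀ j', j' < j0 → ((Fstep prog (-1))^[j'] (0, 0)).1 ≠ x :=
    fun j' hj' => Nat.find_min hex hj'
  have hle : j0 ≤ j := Nat.find_min' hex he
  have hg : d.get? x = some (((Fstep prog (-1))^[j0] (0, 0)).2) :=
    (hdspec x _).mpr ⟨j0, by omega, hspec, hmin, rfl⟩
  rw [hg]
  rfl

-- ===== VERDICT (by name: the statement is the Claim_ definition above) =====
theorem break_loop_spec : Claim_equal_break_loop := by
  intro instructions _dom pre
  unfold Spec_break_loop break_loop break_loop_alt
  rcases pre with hno | ⟨hWF, hJOK⟩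
  · -- no 'jmp'-prefixed line at all: both sides return none
    have hf : ∀ p ∈ PySem.List.enumerate instructions,
        PySem.Str.startswith p.2 "jmp" = false := by
      intro p hp
      rcases (PySem.List.mem_enumerate_iff instructions 0 p).mp hp with ⟨k, hk, rfl⟩
      have := List.all_eq_true.mp hno _ (List.getElem_mem hk)
      simpa using this
    rw [no_jmp_outerA instructions _ hf]
    have hfil : (PySem.List.enumerate instructions).filter
        (fun p => PySem.Str.startswith p.2 "jmp") = [] := by
      apply List.filter_eq_nil_iff.mpr
      intro p hp
      rw [hf p hp]
      simp
    rw [hfil]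
    rfl
  · -- well-formed program branch
    have hJ : ∀ (k : Nat) (hk : k < instructions.length) (a : Int),
        pvParse instructions[k] = some ("jmp", a) → 0 ≤ (k : Int) + a := by
      intro k hk a hparse
      have hmem : ((k : Int), instructions[k]) ∈ PySem.List.enumerate instructions := by
        rw [PySem.List.mem_enumerate_iff]; exact ⟨k, hk, by simp⟩
      have := List.all_eq_true.mp hJOK _ hmem
      unfold pvJmpOK at this
      simp only [hparse] at this
      simpa using this
    have hHJ := HJ_of instructions hWF hJ
    by_cases hcand : (PySem.List.enumerate instructions).filter
        (fun p => PySem.Str.startswith p.2 "jmp") = []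
    · have hf : ∀ p ∈ PySem.List.enumerate instructions,
          PySem.Str.startswith p.2 "jmp" = false := by
        intro p hp
        have := List.filter_eq_nil_iff.mp hcand p hp
        simpa using this
      rw [no_jmp_outerA instructions _ hf, hcand]
      rfl
    · -- candidates nonempty
      rw [parseB_eq_map instructions hWF]
      set prog := instructions.map (fun s => (pvParse s).getD ("", 0)) with hprog
      have hlen : prog.length = instructions.length := by rw [hprog]; simp
      obtain ⟨K, d, hK0, hrun, hdspec, hdistK, hltK, hstop⟩ :=
        preRunB_spec prog hHJ (2 * prog.length + 2) 0 PySem.Dict.empty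
          (by
            intro x a
            rw [PySem.Dict.get?_empty]
            constructor
            · intro h; cases h
            · rintro ⟨j, hj, _⟩; omega)
          (by intro a b _ hb; omega)
          (by intro j hj; omega)
          (by omega)
      simp only [Function.iterate_zero_apply] at hrun
      have hne : (((PySem.List.enumerate instructions).filter
          (fun p => PySem.Str.startswith p.2 "jmp")).map (fun p => p.1)).isEmpty = false := by
        rw [List.isEmpty_eq_false_iff]
        simpa using hcand
      -- the outer candidate loop, candidate by candidate
      have houter : ∀ l : List (Int × String),
          (∀ p ∈ l, p ∈ PySem.List.enumerate instructions) →
          tryCandB prog d (decide ((prog.length : Int) ≤ ((Fstep prog (-1))^[K] (0, 0)).1))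
            (((Fstep prog (-1))^[K] (0, 0)).2)
            ((l.filter (fun p => PySem.Str.startswith p.2 "jmp")).map (fun p => p.1))
          = some (outerA instructions l) := by
        intro l
        induction l with
        | nil => intro _; rfl
        | cons p rest ihl =>
          intro hsub
          obtain ⟨i, instr⟩ := p
          have hpm := hsub (i, instr) List.mem_cons_self
          rcases (PySem.List.mem_enumerate_iff instructions 0 (i, instr)).mp hpm with ⟨kk, hkk, heq⟩
          rw [Prod.mk.injEq] at heq
          obtain ⟨hieq, hinstr⟩ := heq
          have hi0 : 0 ≤ i := by rw [hieq]; omega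
          have hin : i < (instructions.length : Int) := by rw [hieq]; omega
          have hinp : i < (prog.length : Int) := by rw [hlen]; exact hin
          have hrest := fun q hq => hsub q (List.mem_cons_of_mem _ hq)
          by_cases hs : PySem.Str.startswith instr "jmp" = true
          · have h0n : (0 : Int) < (instructions.length : Int) := by omega
            obtain ⟨r, hA, hS⟩ := run_eq instructions i hWF hJ hi0 hin
              (2 * instructions.length + 2) 0 0 PySem.Set.empty le_rfl h0n
              List.nodup_nil (by intro x hx; cases hx)
              (by simp only [PySem.Set.empty, List.length_nil]; omega)
            rw [← hprog] at hS
            have hfA : 2 * (instructions.set i.toNat "nop +0").length + 2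
                = 2 * instructions.length + 2 := by simp
            rw [List.filter_cons_of_pos (by simpa using hs), List.map_cons]
            simp only [outerA, hs, if_true, tryCandB]
            rw [hfA, hA]
            by_cases hex : ∃ M, (prog.length : Int) ≤ ((Fstep prog i)^[M] (0, 0)).1
            · -- the flipped program terminates
              set M := Nat.find hex with hMdef
              have hexM : (prog.length : Int) ≤ ((Fstep prog i)^[M] (0, 0)).1 :=
                Nat.find_spec hex
              have hltM : ∀ k, k < M → ((Fstep prog i)^[k] (0, 0)).1 < (prog.length : Int) := by
                intro k hk
                have := Nat.find_min hex hk
                omega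
              have hM1 : 1 ≤ M := by
                rcases Nat.eq_zero_or_pos M with h | h
                · exfalso
                  rw [h] at hexM
                  simp only [Function.iterate_zero_apply] at hexM
                  rw [hlen] at hexM
                  omega
                · exact h
              have hMle : M ≤ prog.length := pair_exit_le prog i hHJ (0, 0) (by simp) M hexM hltM
              have hrs := runSet_exit prog i hHJ M 0 0 PySem.Set.empty
                (2 * instructions.length + 2) le_rfl hM1 (by omega) hexM hltM
                (pair_nodup prog i (0, 0) M hexM hltM)
                (by intro k _ _ h; cases h)
              rw [hrs] at hS
              obtain ⟨done, racc⟩ := r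
              cases done with
              | false => exact absurd hS (by simp)
              | true =>
                simp only [if_true] at hS
                injection hS with hS2
                by_cases hocc : ∃ m, ((Fstep prog (-1))^[m] (0, 0)).1 = i
                · -- the original run executes i
                  set kf := Nat.find hocc with hkfdef
                  have hkspec : ((Fstep prog (-1))^[kf] (0, 0)).1 = i := Nat.find_spec hocc
                  have hkmin : ∀ j, j < kf → ((Fstep prog (-1))^[j] (0, 0)).1 ≠ i :=
                    fun j hj => Nat.find_min hocc hj
                  have hwin : ∃ j, j < K ∧ ((Fstep prog (-1))^[j] (0, 0)).1 = i := by
                    rcases hstop with hstopL | ⟨a, haK, hrep⟩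
                    · rcases Nat.lt_or_ge kf K with h | h
                      · exact ⟨kf, h, hkspec⟩
                      · exfalso
                        have habs := iter_absorb prog (-1) (0, 0) K hstopL kf h
                        rw [habs] at hkspec
                        omega
                    · obtain ⟨j, hj, he⟩ := pair_values_in_window prog (-1) (0, 0) a K haK
                        hrep kf
                      exact ⟨j, hj, by rw [← he]; exact hkspec⟩
                  have hkfK : kf < K := by
                    obtain ⟨j, hj, he⟩ := hwin
                    have := Nat.find_min' hocc he
                    omega
                  have hget : d.get? i = some (((Fstep prog (-1))^[kf] (0, 0)).2) :=
                    (hdspec i _).mpr ⟨kf, hkfK, hkspec, hkmin, rfl⟩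
                  rw [hget]
                  dsimp only
                  have hsp : (Fstep prog i)^[kf] (0, 0) = (Fstep prog (-1))^[kf] (0, 0) :=
                    splice_eq prog i hHJ kf hkmin
                  have hstep1 : (Fstep prog i)^[kf + 1] (0, 0)
                      = (i + 1, ((Fstep prog (-1))^[kf] (0, 0)).2) := by
                    rw [Function.iterate_succ_apply', hsp]
                    exact Fstep_at_flip prog i _ hkspec hi0 hinp
                  have hshift : ∀ t, (Fstep prog i)^[t] (i + 1, ((Fstep prog (-1))^[kf] (0, 0)).2)
                      = (Fstep prog i)^[t + (kf + 1)] (0, 0) := by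
                    intro t
                    rw [Function.iterate_add_apply, hstep1]
                  have hlow : ∀ j, j ≤ kf → ((Fstep prog i)^[j] (0, 0)).1 < (prog.length : Int) := by
                    intro j hj
                    have hspj : (Fstep prog i)^[j] (0, 0) = (Fstep prog (-1))^[j] (0, 0) :=
                      splice_eq prog i hHJ j (fun j' hj' => hkmin j' (by omega))
                    rw [hspj]
                    by_contra hge
                    rw [not_lt] at hge
                    have habs := iter_absorb prog (-1) (0, 0) j hge kf hj
                    rw [habs] at hkspec
                    omega
                  have hMk : kf + 1 ≤ M := by
                    by_contra h
                    rw [not_le] at h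
                    have := hlow M (by omega)
                    omega
                  have hwalk := walkB_exit prog i hHJ (M - (kf + 1)) (i + 1)
                    (((Fstep prog (-1))^[kf] (0, 0)).2) (prog.length + 1)
                    (by omega) (by omega)
                    (by
                      rw [hshift]
                      have harith : M - (kf + 1) + (kf + 1) = M := by omega
                      rw [harith]
                      exact hexM)
                    (by
                      intro t ht
                      rw [hshift]
                      exact hltM (t + (kf + 1)) (by omega))
                  rw [hwalk]
                  dsimp only
                  have hv : (Fstep prog i)^[M - (kf + 1)]
                      (i + 1, ((Fstep prog (-1))^[kf] (0, 0)).2) = (Fstep prog i)^[M] (0, 0) := by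
                    rw [hshift]
                    congr 1
                    omega
                  rw [hv, hS2]
                · -- the original run never executes i: flipped = original
                  rw [not_exists] at hocc
                  have hget : d.get? i = none := by
                    cases hg : d.get? i with
                    | none => rfl
                    | some a =>
                      exfalso
                      obtain ⟨j, _, hpj, _, _⟩ := (hdspec i a).mp hg
                      exact hocc j hpj
                  rw [hget]
                  dsimp only
                  have hall : ∀ m, (Fstep prog i)^[m] (0, 0) = (Fstep prog (-1))^[m] (0, 0) :=
                    fun m => splice_eq prog i hHJ m (fun j _ => hocc j)
                  have hdone : (prog.length : Int) ≤ ((Fstep prog (-1))^[K] (0, 0)).1 := by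
                    rcases hstop with h | ⟨a, haK, hrep⟩
                    · exact h
                    · exfalso
                      have hKlt : ((Fstep prog (-1))^[K] (0, 0)).1 < (prog.length : Int) := by
                        rw [← hrep]
                        exact hltK a haK
                      have hnx := pair_no_exit_of_repeat prog (-1) (0, 0) a K haK hrep
                        (by
                          intro k hk
                          rcases Nat.lt_or_ge k K with h' | h'
                          · exact hltK k h'
                          · have : k = K := by omega
                            subst this
                            exact hKlt)
                      have := hnx M
                      rw [← hall M] at this
                      omega
                  rw [if_pos (by simpa using hdone)]
                  have hMK : M = K := by
                    have h1 : (prog.length : Int) ≤ ((Fstep prog (-1))^[M] (0, 0)).1 := by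
                      rw [← hall]
                      exact hexM
                    rcases Nat.lt_trichotomy M K with h | h | h
                    · have := hltK M h
                      omega
                    · exact h
                    · have := hltM K h
                      rw [hall] at this
                      omega
                  rw [← hS2, hall M, hMK]
            · -- the flipped program loops: both sides move to the next candidate
              rw [not_exists] at hex
              have hexlt : ∀ M, ((Fstep prog i)^[M] (0, 0)).1 < (prog.length : Int) := by
                intro M
                have := hex M
                omega
              have hrs := runSet_noexit prog i hHJ (2 * instructions.length + 2) 0 0
                PySem.Set.empty le_rfl hexlt
              rw [hrs] at hS
              obtain ⟨done, racc⟩ := r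
              cases done with
              | true => exact absurd hS.symm (by simp)
              | false =>
                cases hg : d.get? i with
                | some a0 =>
                  obtain ⟨j, hjK, hpj, hfirst, ha0⟩ := (hdspec i a0).mp hg
                  have hsp : (Fstep prog i)^[j] (0, 0) = (Fstep prog (-1))^[j] (0, 0) :=
                    splice_eq prog i hHJ j hfirst
                  have hstep1 : (Fstep prog i)^[j + 1] (0, 0) = (i + 1, a0) := by
                    rw [Function.iterate_succ_apply', hsp, ha0]
                    exact Fstep_at_flip prog i _ hpj hi0 hinp
                  have hshift : ∀ t, (Fstep prog i)^[t] (i + 1, a0)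
                      = (Fstep prog i)^[t + (j + 1)] (0, 0) := by
                    intro t
                    rw [Function.iterate_add_apply, hstep1]
                  dsimp only
                  have hw := walkB_noexit prog i hHJ (prog.length + 1) (i + 1) a0
                    (by omega)
                    (fun t _ => by rw [hshift]; exact hexlt (t + (j + 1)))
                  rw [hw]
                  dsimp only
                  exact ihl hrest
                | none =>
                  have hdone : ¬ (prog.length : Int) ≤ ((Fstep prog (-1))^[K] (0, 0)).1 := by
                    intro hge
                    have hnoocc : ∀ m, ((Fstep prog (-1))^[m] (0, 0)).1 ≠ i := by
                      intro m
                      rcases Nat.lt_or_ge m K with h | h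
                      · intro he
                        have := dict_isSome_of_occ prog d K hdspec i m h he
                        rw [hg] at this
                        cases this
                      · have habs := iter_absorb prog (-1) (0, 0) K hge m h
                        rw [habs]
                        intro he
                        rw [he] at hge
                        omega
                    have hall : ∀ m, (Fstep prog i)^[m] (0, 0) = (Fstep prog (-1))^[m] (0, 0) :=
                      fun m => splice_eq prog i hHJ m (fun j' _ => hnoocc j')
                    have := hexlt K
                    rw [hall K] at this
                    omega
                  dsimp only
                  rw [if_neg (by simpa using hdone)]
                  exact ihl hrest
          · have hs' : PySem.Str.startswith instr "jmp" = false := by simpa using hs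
            simp only [outerA, List.filter_cons, hs', Bool.false_eq_true, if_false]
            exact ihl hrest
      dsimp only
      rw [hne]
      simp only [Bool.false_eq_true, if_false]
      rw [hrun]
      dsimp only
      rw [houter (PySem.List.enumerate instructions) (fun p hp => hp)]
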